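-- pv_equiv track=rewrite | github.com/signalwire/signalwire-python | signalwire/signalwire/skills/google_maps/skill.py | _normalize_spoken_numbers
-- ===== SOURCE A (Python) =====
-- _WORD_TO_NUM = {
--     'zero': 0, 'oh': 0, 'o': 0,
--     'one': 1, 'two': 2, 'three': 3, 'four': 4, 'five': 5,
--     'six': 6, 'seven': 7, 'eight': 8, 'nine': 9,
--     'ten': 10, 'eleven': 11, 'twelve': 12, 'thirteen': 13,
--     'fourteen': 14, 'fifteen': 15, 'sixteen': 16, 'seventeen': 17,
--     'eighteen': 18, 'nineteen': 19,
--     'twenty': 20, 'thirty': 30, 'forty': 40, 'fifty': 50,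
--     'sixty': 60, 'seventy': 70, 'eighty': 80, 'ninety': 90,
-- }
--
-- def _normalize_spoken_numbers(text):
--     """Convert spoken number words to digits for address lookups.
--
--     Speech-to-text often transcribes street numbers as words:
--       "Seven one four East Osage" → "714 East Osage"
--       "Three oh five Main Street" → "305 Main Street"
--       "Twenty three Elm"          → "23 Elm"
--       "Twelve thirty four Oak"    → "1234 Oak"
--       "Seven hundred fourteen"    → "714"
--     Already-numeric input passes through unchanged.
--     """
--     words = text.split()
--     tokens = []  # mix of ints (from number words) and strs (regular words)
--     i = 0
--
--     while i < len(words):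
--         w = words[i].lower().rstrip('.,')
--
--         if w in _WORD_TO_NUM:
--             val = _WORD_TO_NUM[w]
--
--             # Tens + units: "twenty three" → 23
--             if val >= 20 and val % 10 == 0 and i + 1 < len(words):
--                 nxt = words[i + 1].lower().rstrip('.,')
--                 if nxt in _WORD_TO_NUM and 1 <= _WORD_TO_NUM[nxt] <= 9:
--                     val += _WORD_TO_NUM[nxt]
--                     i += 1
--
--             # Hundred: "seven hundred" → 700, "seven hundred fourteen" → 714
--             if i + 1 < len(words) and words[i + 1].lower().rstrip('.,') == 'hundred':
--                 val *= 100
--                 i += 1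
--                 if i + 1 < len(words):
--                     nxt = words[i + 1].lower().rstrip('.,')
--                     if nxt in _WORD_TO_NUM:
--                         rem = _WORD_TO_NUM[nxt]
--                         if rem >= 20 and rem % 10 == 0 and i + 2 < len(words):
--                             nxt2 = words[i + 2].lower().rstrip('.,')
--                             if nxt2 in _WORD_TO_NUM and 1 <= _WORD_TO_NUM[nxt2] <= 9:
--                                 rem += _WORD_TO_NUM[nxt2]
--                                 i += 1
--                         val += rem
--                         i += 1
--
--             tokens.append(str(val))
--             i += 1
--         else:
--             tokens.append(words[i])
--             i += 1
--
--     # Collapse adjacent digit tokens: ["7","1","4","East"] → ["714","East"]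
--     result = []
--     num_buf = []
--     for tok in tokens:
--         if tok.isdigit():
--             num_buf.append(tok)
--         else:
--             if num_buf:
--                 result.append(''.join(num_buf))
--                 num_buf = []
--             result.append(tok)
--     if num_buf:
--         result.append(''.join(num_buf))
--
--     return ' '.join(result)
-- ===== SOURCE B (Python) =====
-- _WORD_TO_NUM = {
--     'zero': 0, 'oh': 0, 'o': 0,
--     'one': 1, 'two': 2, 'three': 3, 'four': 4, 'five': 5,
--     'six': 6, 'seven': 7, 'eight': 8, 'nine': 9,
--     'ten': 10, 'eleven': 11, 'twelve': 12, 'thirteen': 13,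
--     'fourteen': 14, 'fifteen': 15, 'sixteen': 16, 'seventeen': 17,
--     'eighteen': 18, 'nineteen': 19,
--     'twenty': 20, 'thirty': 30, 'forty': 40, 'fifty': 50,
--     'sixty': 60, 'seventy': 70, 'eighty': 80, 'ninety': 90,
-- }
--
--
-- def _norm(w):
--     return w.lower().rstrip('.,')
--
--
-- def _merge_unit(val, words, i):
--     """Merge a following units word into a round tens value: 20..90 + 1..9."""
--     if val >= 20 and val % 10 == 0 and i < len(words):
--         u = _WORD_TO_NUM.get(_norm(words[i]))
--         if u is not None and 1 <= u <= 9: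
--             return val + u, i + 1
--     return val, i
--
--
-- def _parse_number(val, words, i):
--     """Continue a number started with value `val`; i is the next unread index."""
--     val, i = _merge_unit(val, words, i)
--     if i < len(words) and _norm(words[i]) == 'hundred':
--         val, i = 100 * val, i + 1
--         if i < len(words):
--             rem = _WORD_TO_NUM.get(_norm(words[i]))
--             if rem is not None:
--                 rem, j = _merge_unit(rem, words, i + 1)
--                 val, i = val + rem, j
--     return val, i
--
--
-- def _normalize_spoken_numbers(text):
--     words = text.split()
--     out, buf = [], []
--     i = 0
--     while i < len(words):
--         w = words[i]
--         v = _WORD_TO_NUM.get(_norm(w))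
--         if v is not None:
--             v, i = _parse_number(v, words, i + 1)
--             buf.append(str(v))
--         elif w.isdigit():
--             buf.append(w)
--             i += 1
--         else:
--             if buf:
--                 out.append(''.join(buf))
--                 buf = []
--             out.append(w)
--             i += 1
--     if buf:
--         out.append(''.join(buf))
--     return ' '.join(out)
-- ===== Notes on version B (the rewrite author's own statement) =====
-- stated objective: simpler
-- what changed: B fuses A's two passes (build a tokens list, then rescan it to collapse adjacent digit tokens) into one pass over the words that maintains a digit-string buffer flushed at each non-numeric word, and factors the tens+units/hundred lookahead into small named helpers (_merge_unit/_parse_number) instead of A's inline index mutation.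
import Mathlib
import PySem

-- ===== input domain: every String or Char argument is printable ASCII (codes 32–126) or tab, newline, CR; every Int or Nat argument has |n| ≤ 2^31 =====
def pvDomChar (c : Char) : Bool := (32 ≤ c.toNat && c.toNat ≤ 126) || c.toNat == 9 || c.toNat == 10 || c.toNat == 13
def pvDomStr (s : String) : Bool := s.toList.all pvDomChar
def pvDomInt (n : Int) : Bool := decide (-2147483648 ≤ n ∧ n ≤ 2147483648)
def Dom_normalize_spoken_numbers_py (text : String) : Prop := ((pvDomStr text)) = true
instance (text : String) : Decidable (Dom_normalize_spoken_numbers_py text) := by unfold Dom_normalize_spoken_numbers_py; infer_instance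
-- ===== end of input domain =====

-- B fuses A's build-tokens-then-collapse two-pass scheme into one pass with a digit buffer,
-- factoring the number lookahead into named helpers; objective: simpler (same O(n) cost).

-- shared module constant: the _WORD_TO_NUM dict literal (distinct keys, insertion order)
def pvW2N : PySem.Dict (List Char) Int := PySem.Dict.mk
  [("zero".toList, 0), ("oh".toList, 0), ("o".toList, 0),
   ("one".toList, 1), ("two".toList, 2), ("three".toList, 3), ("four".toList, 4), ("five".toList, 5),
   ("six".toList, 6), ("seven".toList, 7), ("eight".toList, 8), ("nine".toList, 9),
   ("ten".toList, 10), ("eleven".toList, 11), ("twelve".toList, 12), ("thirteen".toList, 13),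
   ("fourteen".toList, 14), ("fifteen".toList, 15), ("sixteen".toList, 16), ("seventeen".toList, 17),
   ("eighteen".toList, 18), ("nineteen".toList, 19),
   ("twenty".toList, 20), ("thirty".toList, 30), ("forty".toList, 40), ("fifty".toList, 50),
   ("sixty".toList, 60), ("seventy".toList, 70), ("eighty".toList, 80), ("ninety".toList, 90)]

-- w.lower().rstrip('.,') — rstrip with a char argument is ported by hand (PySem has the
-- no-argument rstrip only): drop trailing '.'/',' characters; exact.
def pvNorm (w : List Char) : List Char :=
  ((PySem.Chars.lower w).reverse.dropWhile (fun c => c == '.' || c == ',')).reverse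

-- ===== PORT A =====
-- the while loop of A, index i over words; fuel = words.length suffices since i grows by ≥ 1
-- per iteration (fuel-exhaustion branch is unreachable from the top-level call).
-- words.getD _ [] is only read under the index-in-range guards A itself checks.
-- the body of one iteration of A's while loop for a number word at index i:
-- returns (val, next i) where next i is Python's i after the trailing `i += 1`.
def pvAstep (words : List (List Char)) (v : Int) (i : Nat) : Int × Nat :=
  -- tens + units block
  let p1 : Int × Nat :=
    if v ≥ 20 ∧ PySem.Int.mod v 10 = 0 ∧ i + 1 < words.length then
      match pvW2N.get? (pvNorm (words.getD (i + 1) [])) with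
      | some nv => if 1 ≤ nv ∧ nv ≤ 9 then (v + nv, i + 1) else (v, i)
      | none => (v, i)
    else (v, i)
  -- hundred block
  let p2 : Int × Nat :=
    if p1.2 + 1 < words.length ∧ pvNorm (words.getD (p1.2 + 1) []) = "hundred".toList then
      let val := p1.1 * 100
      let j := p1.2 + 1
      if j + 1 < words.length then
        match pvW2N.get? (pvNorm (words.getD (j + 1) [])) with
        | some rem0 =>
            let q : Int × Nat :=
              if rem0 ≥ 20 ∧ PySem.Int.mod rem0 10 = 0 ∧ j + 2 < words.length then
                match pvW2N.get? (pvNorm (words.getD (j + 2) [])) with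
                | some u => if 1 ≤ u ∧ u ≤ 9 then (rem0 + u, j + 1) else (rem0, j)
                | none => (rem0, j)
              else (rem0, j)
            (val + q.1, q.2 + 1)
        | none => (val, j)
      else (val, j)
    else p1
  (p2.1, p2.2 + 1)

-- the while loop of A, index i over words; fuel = words.length suffices since i grows by ≥ 1
-- per iteration (fuel-exhaustion branch is unreachable from the top-level call).
-- words.getD _ [] is only read under the index-in-range guards A itself checks.
def pvAloop (words : List (List Char)) : Nat → Nat → List (List Char)
  | 0, _ => []
  | fuel + 1, i =>
    if i < words.length then
      match pvW2N.get? (pvNorm (words.getD i [])) with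
      | some v =>
          PySem.Int.toChars (pvAstep words v i).1 :: pvAloop words fuel (pvAstep words v i).2
      | none => words.getD i [] :: pvAloop words fuel (i + 1)
    else []

def normalize_spoken_numbers_py (text : String) : String :=
  let words := PySem.Chars.split₀ text.toList
  let tokens := pvAloop words words.length 0
  -- collapse pass: foldl over tokens with state (result, num_buf), then final flush
  let st := tokens.foldl
    (fun (st : List (List Char) × List (List Char)) tok =>
      if PySem.Chars.strIsdigit tok then (st.1, st.2 ++ [tok])
      else ((st.1 ++ (if st.2.isEmpty then [] else [PySem.Chars.join [] st.2])) ++ [tok], []))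
    ([], [])
  let result := st.1 ++ (if st.2.isEmpty then [] else [PySem.Chars.join [] st.2])
  String.ofList (PySem.Chars.join [' '] result)

-- ===== PORT B =====
-- helper _merge_unit(val, words, i)
def pvMergeUnit (val : Int) (words : List (List Char)) (i : Nat) : Int × Nat :=
  if val ≥ 20 ∧ PySem.Int.mod val 10 = 0 ∧ i < words.length then
    match pvW2N.get? (pvNorm (words.getD i [])) with
    | some u => if 1 ≤ u ∧ u ≤ 9 then (val + u, i + 1) else (val, i)
    | none => (val, i)
  else (val, i)

-- helper _parse_number(val, words, i): i is the next unread index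
def pvParseNumber (val : Int) (words : List (List Char)) (i : Nat) : Int × Nat :=
  let p := pvMergeUnit val words i
  if p.2 < words.length ∧ pvNorm (words.getD p.2 []) = "hundred".toList then
    let val2 := 100 * p.1
    let i2 := p.2 + 1
    if i2 < words.length then
      match pvW2N.get? (pvNorm (words.getD i2 [])) with
      | some rem =>
          let q := pvMergeUnit rem words (i2 + 1)
          (val2 + q.1, q.2)
      | none => (val2, i2)
    else (val2, i2)
  else p

-- B's single fused while loop: out = result so far, buf = pending digit strings
def pvBloop (words : List (List Char)) : Nat → Nat → List (List Char) → List (List Char) → List (List Char)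
  | 0, _, out, buf => out ++ (if buf.isEmpty then [] else [PySem.Chars.join [] buf])
  | fuel + 1, i, out, buf =>
    if i < words.length then
      let w := words.getD i []
      match pvW2N.get? (pvNorm w) with
      | some v =>
          let p := pvParseNumber v words (i + 1)
          pvBloop words fuel p.2 out (buf ++ [PySem.Int.toChars p.1])
      | none =>
          if PySem.Chars.strIsdigit w then pvBloop words fuel (i + 1) out (buf ++ [w])
          else pvBloop words fuel (i + 1)
            (out ++ (if buf.isEmpty then [] else [PySem.Chars.join [] buf]) ++ [w]) []
    else out ++ (if buf.isEmpty then [] else [PySem.Chars.join [] buf])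

def normalize_spoken_numbers_py_alt (text : String) : String :=
  let words := PySem.Chars.split₀ text.toList
  String.ofList (PySem.Chars.join [' '] (pvBloop words words.length 0 [] []))

-- ===== PRECONDITION & SPEC =====
def Spec_normalize_spoken_numbers_py (text : String) (out : String) : Prop :=
  out = normalize_spoken_numbers_py_alt text
instance (text : String) (out : String) : Decidable (Spec_normalize_spoken_numbers_py text out) := by
  unfold Spec_normalize_spoken_numbers_py; infer_instance

-- ===== CLAIM =====
def Claim_equal_normalize_spoken_numbers_py : Prop :=
  ∀ (text : String), Dom_normalize_spoken_numbers_py text →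
    Spec_normalize_spoken_numbers_py text (normalize_spoken_numbers_py text)

-- ===== LEMMAS AND PROOFS =====

-- every value stored in the word table is nonnegative (in fact ≤ 90)
theorem pvW2N_nonneg {w : List Char} {v : Int} (h : pvW2N.get? w = some v) : 0 ≤ v := by
  have h2 := PySem.Dict.mem_items_of_get?_eq_some pvW2N h
  have h3 : v ∈ pvW2N.items.map (·.2) := List.mem_map_of_mem h2
  have hall : ∀ x ∈ pvW2N.items.map (·.2), 0 ≤ x := by decide
  exact hall v h3

theorem pvMergeUnit_nonneg (val : Int) (words : List (List Char)) (i : Nat)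
    (h : 0 ≤ val) : 0 ≤ (pvMergeUnit val words i).1 := by
  unfold pvMergeUnit
  split
  · rcases hg : pvW2N.get? (pvNorm (words.getD i [])) with _ | u
    · simpa using h
    · have := pvW2N_nonneg hg
      simp only []
      split <;> simp <;> omega
  · simpa using h

theorem pvParseNumber_nonneg (val : Int) (words : List (List Char)) (i : Nat)
    (h : 0 ≤ val) : 0 ≤ (pvParseNumber val words i).1 := by
  have h1 := pvMergeUnit_nonneg val words i h
  rcases hP : pvMergeUnit val words i with ⟨a, b⟩
  rw [hP] at h1
  unfold pvParseNumber
  rw [hP]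
  dsimp only
  split
  · split
    · rcases hg : pvW2N.get? (pvNorm (words.getD (b + 1) [])) with _ | rem
      · simp; omega
      · have hr := pvW2N_nonneg hg
        have h2 := pvMergeUnit_nonneg rem words (b + 1 + 1) hr
        simp; positivity
    · simp; omega
  · exact h1

-- str(n) for n ≥ 0 consists of digit characters only (and is nonempty)
theorem pvToDigitsCore_digits (fuel n : Nat) (acc : List Char)
    (hacc : ∀ c ∈ acc, PySem.Chars.isdigit c = true) :
    ∀ c ∈ Nat.toDigitsCore 10 fuel n acc, PySem.Chars.isdigit c = true := by
  induction fuel generalizing n acc with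
  | zero => simpa [Nat.toDigitsCore] using hacc
  | succ fuel ih =>
    have hd : PySem.Chars.isdigit ((n % 10).digitChar) = true := by
      have : n % 10 < 10 := Nat.mod_lt _ (by norm_num)
      interval_cases h : n % 10 <;> decide
    simp only [Nat.toDigitsCore]
    split
    · intro c hc
      rcases List.mem_cons.mp hc with rfl | hc
      · exact hd
      · exact hacc c hc
    · exact ih (n / 10) _ (by
        intro c hc
        rcases List.mem_cons.mp hc with rfl | hc
        · exact hd
        · exact hacc c hc)

theorem pvToDigitsCore_ne_nil (fuel n : Nat) (acc : List Char) (hacc : acc ≠ [] ∨ 0 < fuel) :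
    Nat.toDigitsCore 10 fuel n acc ≠ [] := by
  induction fuel generalizing n acc with
  | zero =>
    simp only [Nat.toDigitsCore]
    rcases hacc with h | h
    · exact h
    · omega
  | succ fuel ih =>
    simp only [Nat.toDigitsCore]
    split
    · simp
    · exact ih (n / 10) _ (Or.inl (by simp))

theorem pvToChars_isdigit (n : Int) (h : 0 ≤ n) :
    PySem.Chars.strIsdigit (PySem.Int.toChars n) = true := by
  have hlt : ¬ n < 0 := by omega
  simp only [PySem.Int.toChars, hlt, if_false]
  unfold Nat.toDigits
  have hne := pvToDigitsCore_ne_nil (n.toNat + 1) n.toNat [] (Or.inr (by omega))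
  have hall := pvToDigitsCore_digits (n.toNat + 1) n.toNat [] (by simp)
  simp [PySem.Chars.strIsdigit, hne, List.all_eq_true]
  exact hall

-- the recursive form of A's collapse pass
def pvCollapse (buf : List (List Char)) : List (List Char) → List (List Char)
  | [] => if buf.isEmpty then [] else [PySem.Chars.join [] buf]
  | t :: ts =>
    if PySem.Chars.strIsdigit t then pvCollapse (buf ++ [t]) ts
    else (if buf.isEmpty then [] else [PySem.Chars.join [] buf]) ++ t :: pvCollapse [] ts

-- A's foldl collapse equals the recursive collapse, relative to any accumulated state
theorem pvCollapse_foldl (toks : List (List Char)) :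
    ∀ (res buf : List (List Char)),
      (let st := toks.foldl
        (fun (st : List (List Char) × List (List Char)) tok =>
          if PySem.Chars.strIsdigit tok then (st.1, st.2 ++ [tok])
          else ((st.1 ++ (if st.2.isEmpty then [] else [PySem.Chars.join [] st.2])) ++ [tok], []))
        (res, buf)
       st.1 ++ (if st.2.isEmpty then [] else [PySem.Chars.join [] st.2]))
      = res ++ pvCollapse buf toks := by
  induction toks with
  | nil => intro res buf; simp [pvCollapse]
  | cons t ts ih =>
    intro res buf
    simp only [List.foldl_cons, pvCollapse]
    by_cases hd : PySem.Chars.strIsdigit t = true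
    · simp only [hd, if_true]
      exact ih res (buf ++ [t])
    · simp only [hd]
      rw [ih]
      simp

-- one parsing step: B's _parse_number computes exactly A's inline (value, next index) pair
theorem pvStep_eq (words : List (List Char)) (v : Int) (i : Nat) :
    pvParseNumber v words (i + 1) = pvAstep words v i := by
  unfold pvAstep pvParseNumber pvMergeUnit
  dsimp only
  have e2 : ∀ a : Nat, a + 2 = a + 1 + 1 := fun a => rfl
  simp only [e2]
  by_cases hC1 : v ≥ 20 ∧ PySem.Int.mod v 10 = 0 ∧ i + 1 < words.length
  · simp only [if_pos hC1]
    rcases hg1 : pvW2N.get? (pvNorm (words.getD (i + 1) [])) with _ | nv <;>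
      simp only [hg1] <;> (try dsimp only)
    · split_ifs <;>
      first
      | rfl
      | (rcases hg2 : pvW2N.get? (pvNorm (words.getD (i + 1 + 1) [])) with _ | rem <;>
          simp only [hg2] <;> (try split_ifs) <;>
          (first
            | rfl
            | (rcases hg3 : pvW2N.get? (pvNorm (words.getD (i + 1 + 1 + 1) [])) with _ | u <;>
                simp only [hg3] <;> (try split_ifs) <;>
                first | rfl | (simp [Prod.ext_iff, mul_comm]; done))
            | (simp [Prod.ext_iff, mul_comm]; done)))
      | (rcases hg2 : pvW2N.get? (pvNorm (words.getD (i + 1 + 1 + 1) [])) with _ | rem <;>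
          simp only [hg2] <;> (try split_ifs) <;>
          (first
            | rfl
            | (rcases hg3 : pvW2N.get? (pvNorm (words.getD (i + 1 + 1 + 1 + 1) [])) with _ | u <;>
                simp only [hg3] <;> (try split_ifs) <;>
                first | rfl | (simp [Prod.ext_iff, mul_comm]; done))
            | (simp [Prod.ext_iff, mul_comm]; done)))
    · by_cases hU : 1 ≤ nv ∧ nv ≤ 9 <;> simp only [if_pos, if_neg, hU] <;> (try dsimp only)
      · split_ifs <;>
      first
      | rfl
      | (rcases hg2 : pvW2N.get? (pvNorm (words.getD (i + 1 + 1) [])) with _ | rem <;>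
          simp only [hg2] <;> (try split_ifs) <;>
          (first
            | rfl
            | (rcases hg3 : pvW2N.get? (pvNorm (words.getD (i + 1 + 1 + 1) [])) with _ | u <;>
                simp only [hg3] <;> (try split_ifs) <;>
                first | rfl | (simp [Prod.ext_iff, mul_comm]; done))
            | (simp [Prod.ext_iff, mul_comm]; done)))
      | (rcases hg2 : pvW2N.get? (pvNorm (words.getD (i + 1 + 1 + 1) [])) with _ | rem <;>
          simp only [hg2] <;> (try split_ifs) <;>
          (first
            | rfl
            | (rcases hg3 : pvW2N.get? (pvNorm (words.getD (i + 1 + 1 + 1 + 1) [])) with _ | u <;>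
                simp only [hg3] <;> (try split_ifs) <;>
                first | rfl | (simp [Prod.ext_iff, mul_comm]; done))
            | (simp [Prod.ext_iff, mul_comm]; done)))
      · split_ifs <;>
      first
      | rfl
      | (rcases hg2 : pvW2N.get? (pvNorm (words.getD (i + 1 + 1) [])) with _ | rem <;>
          simp only [hg2] <;> (try split_ifs) <;>
          (first
            | rfl
            | (rcases hg3 : pvW2N.get? (pvNorm (words.getD (i + 1 + 1 + 1) [])) with _ | u <;>
                simp only [hg3] <;> (try split_ifs) <;>
                first | rfl | (simp [Prod.ext_iff, mul_comm]; done))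
            | (simp [Prod.ext_iff, mul_comm]; done)))
      | (rcases hg2 : pvW2N.get? (pvNorm (words.getD (i + 1 + 1 + 1) [])) with _ | rem <;>
          simp only [hg2] <;> (try split_ifs) <;>
          (first
            | rfl
            | (rcases hg3 : pvW2N.get? (pvNorm (words.getD (i + 1 + 1 + 1 + 1) [])) with _ | u <;>
                simp only [hg3] <;> (try split_ifs) <;>
                first | rfl | (simp [Prod.ext_iff, mul_comm]; done))
            | (simp [Prod.ext_iff, mul_comm]; done)))
  · simp only [if_neg hC1]
    try dsimp only
    split_ifs <;>
      first
      | rfl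
      | (rcases hg2 : pvW2N.get? (pvNorm (words.getD (i + 1 + 1) [])) with _ | rem <;>
          simp only [hg2] <;> (try split_ifs) <;>
          (first
            | rfl
            | (rcases hg3 : pvW2N.get? (pvNorm (words.getD (i + 1 + 1 + 1) [])) with _ | u <;>
                simp only [hg3] <;> (try split_ifs) <;>
                first | rfl | (simp [Prod.ext_iff, mul_comm]; done))
            | (simp [Prod.ext_iff, mul_comm]; done)))
      | (rcases hg2 : pvW2N.get? (pvNorm (words.getD (i + 1 + 1 + 1) [])) with _ | rem <;>
          simp only [hg2] <;> (try split_ifs) <;>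
          (first
            | rfl
            | (rcases hg3 : pvW2N.get? (pvNorm (words.getD (i + 1 + 1 + 1 + 1) [])) with _ | u <;>
                simp only [hg3] <;> (try split_ifs) <;>
                first | rfl | (simp [Prod.ext_iff, mul_comm]; done))
            | (simp [Prod.ext_iff, mul_comm]; done)))

-- the fused loop equals collapse ∘ token building (same fuel, any accumulators)
theorem pvLoop_rel (words : List (List Char)) :
    ∀ (fuel i : Nat) (out buf : List (List Char)),
      pvBloop words fuel i out buf = out ++ pvCollapse buf (pvAloop words fuel i) := by
  intro fuel
  induction fuel with
  | zero => intro i out buf; simp [pvBloop, pvAloop, pvCollapse]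
  | succ fuel ih =>
    intro i out buf
    by_cases hi : i < words.length
    · simp only [pvBloop, pvAloop, if_pos hi]
      rcases hg : pvW2N.get? (pvNorm (words.getD i [])) with _ | v <;> simp only [hg]
      · by_cases hd : PySem.Chars.strIsdigit (words.getD i []) = true
        · rw [if_pos hd, ih]
          conv_rhs => rw [pvCollapse]
          rw [if_pos hd]
        · rw [if_neg hd, ih]
          conv_rhs => rw [pvCollapse]
          rw [if_neg hd]
          simp
      · rw [← pvStep_eq words v i, ih]
        have hd : PySem.Chars.strIsdigit
            (PySem.Int.toChars (pvParseNumber v words (i + 1)).1) = true :=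
          pvToChars_isdigit _ (pvParseNumber_nonneg v words (i + 1) (pvW2N_nonneg hg))
        conv_rhs => rw [pvCollapse]
        rw [if_pos hd]
    · simp [pvBloop, pvAloop, hi, pvCollapse]

-- ===== VERDICT =====
theorem normalize_spoken_numbers_py_spec : Claim_equal_normalize_spoken_numbers_py := by
  intro text _
  unfold Spec_normalize_spoken_numbers_py
  unfold normalize_spoken_numbers_py normalize_spoken_numbers_py_alt
  simp only []
  rw [pvLoop_rel, pvCollapse_foldl]
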